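-- pv_equiv track=rewrite | github.com/collinsgraciano/pg_online_book_copyright_music_online_update | audiobook_pipeline_runtime_core_v3_zh_tw_localized.py | normalize_youtube_tags
-- ===== SOURCE A (Python) =====
-- def normalize_youtube_tags(tags, max_total_chars=500, max_count=30):
--     """兼容空格/逗号/# 标签格式，并控制 YouTube 可接受的总体长度。"""
--     if not tags:
--         return []
--
--     raw_items = []
--     for chunk in str(tags).replace("\n", " ").split(","):
--         chunk = chunk.strip()
--         if not chunk:
--             continue
--         if "#" in chunk and " " in chunk:
--             raw_items.extend(part for part in chunk.split() if part.strip())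
--         else:
--             raw_items.append(chunk)
--
--     normalized = []
--     seen = set()
--     total_chars = 0
--     for item in raw_items:
--         cleaned = item.strip().strip("#").strip()
--         if not cleaned:
--             continue
--         key = cleaned.lower()
--         if key in seen:
--             continue
--
--         extra_chars = len(cleaned) + (1 if normalized else 0)
--         if len(normalized) >= max_count or total_chars + extra_chars > max_total_chars:
--             break
--
--         normalized.append(cleaned)
--         seen.add(key)
--         total_chars += extra_chars
--
--     return normalized
-- ===== SOURCE B (Python) =====
-- def normalize_youtube_tags(tags, max_total_chars=500, max_count=30):
--     """Two-phase rewrite: (1) one pass parsing + cleaning + case-insensitive dedup,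
--     (2) an index/prefix-sum cut deciding how many tags fit, then a slice."""
--     if not tags:
--         return []
--
--     def pieces(chunk):
--         chunk = chunk.strip()
--         if not chunk:
--             return []
--         if "#" in chunk and " " in chunk:
--             return [p for p in chunk.split() if p.strip()]
--         return [chunk]
--
--     clean = []
--     seen = set()
--     for part in (p for c in str(tags).replace("\n", " ").split(",") for p in pieces(c)):
--         cleaned = part.strip().strip("#").strip()
--         if not cleaned:
--             continue
--         key = cleaned.lower()
--         if key not in seen:
--             seen.add(key)
--             clean.append(cleaned)
--
--     # cut index: how many leading clean tags fit under both limits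
--     k = 0
--     running = 0
--     while k < len(clean) and k < max_count:
--         extra = len(clean[k]) + (1 if k else 0)
--         if running + extra > max_total_chars:
--             break
--         running += extra
--         k += 1
--     return clean[:k]
-- ===== Notes on version B (the rewrite author's own statement) =====
-- stated objective: alternative
-- what changed: A's single loop that interleaves cleaning, case-insensitive dedup and limit enforcement is split into a dedup-only cleaning pass (with parsing done via a pieces() helper and a flat comprehension) followed by a separate prefix-sum loop that computes a cut index, returned as a slice of the clean list.
import Mathlib
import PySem

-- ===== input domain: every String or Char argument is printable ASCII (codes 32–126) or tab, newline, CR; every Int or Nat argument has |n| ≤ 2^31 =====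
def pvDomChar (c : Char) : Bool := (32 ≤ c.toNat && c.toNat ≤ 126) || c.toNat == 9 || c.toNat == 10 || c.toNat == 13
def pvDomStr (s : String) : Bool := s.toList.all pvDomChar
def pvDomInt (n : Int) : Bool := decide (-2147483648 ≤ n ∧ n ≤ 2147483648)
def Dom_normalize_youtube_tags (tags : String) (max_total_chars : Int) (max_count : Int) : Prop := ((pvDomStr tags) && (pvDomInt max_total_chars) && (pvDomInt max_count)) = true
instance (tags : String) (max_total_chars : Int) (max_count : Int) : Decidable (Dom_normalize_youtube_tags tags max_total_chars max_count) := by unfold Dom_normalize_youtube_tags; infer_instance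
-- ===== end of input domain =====

-- B separates A's interleaved dedup/limit loop into a dedup pass followed by a prefix-sum
-- cut index and a slice (objective: alternative decomposition; same cost).

-- ===== PORT A =====
-- A's second loop ('for item in raw_items' with break): structural recursion over the same state
def pvLoopA (maxc maxn : Int) : List String → List String → PySem.Set String → Int → List String
  | [], normalized, _, _ => normalized
  | item :: rest, normalized, seen, total =>
    let cleaned := PySem.Str.strip (PySem.Str.stripChars (PySem.Str.strip item) "#")
    if cleaned = "" then pvLoopA maxc maxn rest normalized seen total
    else
      let key := PySem.Str.lower cleaned
      if PySem.Set.contains seen key then pvLoopA maxc maxn rest normalized seen total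
      else
        let extra : Int := PySem.Str.len cleaned + (if normalized = [] then 0 else 1)
        if maxn ≤ (normalized.length : Int) ∨ maxc < total + extra then normalized
        else pvLoopA maxc maxn rest (normalized ++ [cleaned]) (PySem.Set.add seen key) (total + extra)

def normalize_youtube_tags (tags : String) (max_total_chars : Int) (max_count : Int) : List String :=
  if tags = "" then []
  else
    -- str(tags).replace("\n"," ").split(","): sep "," ≠ "" so split? is always some
    let chunks := (PySem.Str.split? (PySem.Str.replace tags "\n" " ") ",").getD []
    let raw_items := chunks.foldl (fun acc chunk0 =>
      let chunk := PySem.Str.strip chunk0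
      if chunk = "" then acc
      else if PySem.Str.isIn "#" chunk && PySem.Str.isIn " " chunk then
        acc ++ (PySem.Str.split₀ chunk).filter (fun p => !(PySem.Str.strip p == ""))
      else acc ++ [chunk]) []
    pvLoopA max_total_chars max_count raw_items [] PySem.Set.empty 0

-- ===== PORT B =====
-- B's helper pieces(chunk)
def pvPieces (chunk0 : String) : List String :=
  let chunk := PySem.Str.strip chunk0
  if chunk = "" then []
  else if PySem.Str.isIn "#" chunk && PySem.Str.isIn " " chunk then
    (PySem.Str.split₀ chunk).filter (fun p => !(PySem.Str.strip p == ""))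
  else [chunk]

-- B's dedup pass: clean list in order, case-insensitive seen set
def pvDedup : List String → PySem.Set String → List String
  | [], _ => []
  | part :: rest, seen =>
    let cleaned := PySem.Str.strip (PySem.Str.stripChars (PySem.Str.strip part) "#")
    if cleaned = "" then pvDedup rest seen
    else
      let key := PySem.Str.lower cleaned
      if PySem.Set.contains seen key then pvDedup rest seen
      else cleaned :: pvDedup rest (PySem.Set.add seen key)

-- B's while loop computing the cut index k
def pvCut (maxc maxn : Int) : List String → Int → Int → Int
  | [], k, _ => k
  | c :: rest, k, running =>
    if k < maxn then
      let extra : Int := PySem.Str.len c + (if k = 0 then 0 else 1)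
      if maxc < running + extra then k
      else pvCut maxc maxn rest (k + 1) (running + extra)
    else k

def normalize_youtube_tags_alt (tags : String) (max_total_chars : Int) (max_count : Int) : List String :=
  if tags = "" then []
  else
    let clean := pvDedup (((PySem.Str.split? (PySem.Str.replace tags "\n" " ") ",").getD []).flatMap pvPieces) PySem.Set.empty
    PySem.List.slice clean none (some (pvCut max_total_chars max_count clean 0 0))

-- ===== PRECONDITION & SPEC =====
def Spec_normalize_youtube_tags (tags : String) (max_total_chars : Int) (max_count : Int) (out : List String) : Prop := out = normalize_youtube_tags_alt tags max_total_chars max_count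
instance (tags : String) (max_total_chars : Int) (max_count : Int) (out : List String) : Decidable (Spec_normalize_youtube_tags tags max_total_chars max_count out) := by unfold Spec_normalize_youtube_tags; infer_instance

-- ===== CLAIM (what is proved, stated in full; the proofs are below) =====
def Claim_equal_normalize_youtube_tags : Prop := ∀ (tags : String) (max_total_chars : Int) (max_count : Int), Dom_normalize_youtube_tags tags max_total_chars max_count → Spec_normalize_youtube_tags tags max_total_chars max_count (normalize_youtube_tags tags max_total_chars max_count)

-- ===== LEMMAS AND PROOFS =====

-- proof-only helper: the prefix of `clean` that the limits admit
def pvTake (maxc maxn : Int) : List String → Int → Int → List String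
  | [], _, _ => []
  | c :: rest, k, r =>
    if k < maxn then
      let extra : Int := PySem.Str.len c + (if k = 0 then 0 else 1)
      if maxc < r + extra then [] else c :: pvTake maxc maxn rest (k + 1) (r + extra)
    else []

-- the body of A's raw_items foldl appends exactly pvPieces
theorem parse_body_eq :
    (fun (acc : List String) (chunk0 : String) =>
      let chunk := PySem.Str.strip chunk0
      if chunk = "" then acc
      else if PySem.Str.isIn "#" chunk && PySem.Str.isIn " " chunk then
        acc ++ (PySem.Str.split₀ chunk).filter (fun p => !(PySem.Str.strip p == ""))
      else acc ++ [chunk])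
    = (fun acc chunk0 => acc ++ pvPieces chunk0) := by
  funext acc chunk0
  simp only [pvPieces]
  split_ifs <;> simp

theorem pvTake_cons (maxc maxn : Int) (c : String) (rest : List String) (k r : Int) :
    pvTake maxc maxn (c :: rest) k r
      = if maxn ≤ k ∨ maxc < r + (PySem.Str.len c + (if k = 0 then 0 else 1))
        then []
        else c :: pvTake maxc maxn rest (k + 1) (r + (PySem.Str.len c + (if k = 0 then 0 else 1))) := by
  simp only [pvTake]
  generalize PySem.Str.len c + (if k = 0 then (0:Int) else 1) = e
  by_cases h1 : k < maxn
  · rw [if_pos h1]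
    by_cases h2 : maxc < r + e
    · rw [if_pos h2, if_pos (Or.inr h2)]
    · rw [if_neg h2, if_neg (by omega)]
  · rw [if_neg h1, if_pos (Or.inl (by omega))]

-- A's interleaved loop = dedup pass followed by the limited prefix
theorem loopA_eq (maxc maxn : Int) (items : List String) :
    ∀ (normalized : List String) (seen : PySem.Set String) (total : Int),
    pvLoopA maxc maxn items normalized seen total
      = normalized ++ pvTake maxc maxn (pvDedup items seen) (normalized.length : Int) total := by
  induction items with
  | nil => intro n s t; simp [pvLoopA, pvDedup, pvTake]
  | cons item rest ih =>
    intro n s t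
    simp only [pvLoopA, pvDedup]
    by_cases h1 : PySem.Str.strip (PySem.Str.stripChars (PySem.Str.strip item) "#") = ""
    · rw [if_pos h1, if_pos h1]; exact ih n s t
    · rw [if_neg h1, if_neg h1]
      by_cases h2 : PySem.Set.contains s (PySem.Str.lower (PySem.Str.strip (PySem.Str.stripChars (PySem.Str.strip item) "#"))) = true
      · rw [if_pos h2, if_pos h2]; exact ih n s t
      · rw [if_neg h2, if_neg h2, pvTake_cons]
        have hn0 : (if n = [] then (0:Int) else 1) = (if ((n.length : Int)) = 0 then 0 else 1) := by
          by_cases hn : n = []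
          · simp [hn]
          · rw [if_neg hn, if_neg (by simpa [List.length_eq_zero_iff] using hn)]
        rw [hn0]
        by_cases hstop : maxn ≤ (n.length : Int) ∨ maxc < t + (PySem.Str.len (PySem.Str.strip (PySem.Str.stripChars (PySem.Str.strip item) "#")) + (if ((n.length : Int)) = 0 then 0 else 1))
        · rw [if_pos hstop, if_pos hstop]; simp
        · rw [if_neg hstop, if_neg hstop, ih]
          simp only [List.length_append, List.length_cons, List.length_nil, List.append_assoc,
            List.singleton_append]
          push_cast
          ring_nf

-- pvCut never goes below its starting index
theorem pvCut_ge (maxc maxn : Int) (clean : List String) :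
    ∀ (k r : Int), k ≤ pvCut maxc maxn clean k r := by
  induction clean with
  | nil => intro k r; simp [pvCut]
  | cons c rest ih =>
    intro k r
    simp only [pvCut]
    generalize PySem.Str.len c + (if k = 0 then (0:Int) else 1) = e
    by_cases h1 : k < maxn
    · rw [if_pos h1]
      by_cases h2 : maxc < r + e
      · rw [if_pos h2]
      · rw [if_neg h2]
        have := ih (k + 1) (r + e)
        omega
    · rw [if_neg h1]

-- taking pvCut-many elements gives exactly pvTake
theorem cut_take (maxc maxn : Int) (clean : List String) :
    ∀ (k r : Int), clean.take ((pvCut maxc maxn clean k r) - k).toNat = pvTake maxc maxn clean k r := by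
  induction clean with
  | nil => intro k r; simp [pvCut, pvTake]
  | cons c rest ih =>
    intro k r
    simp only [pvCut, pvTake]
    generalize PySem.Str.len c + (if k = 0 then (0:Int) else 1) = e
    by_cases h1 : k < maxn
    · rw [if_pos h1, if_pos h1]
      by_cases h2 : maxc < r + e
      · rw [if_pos h2, if_pos h2]
        simp
      · rw [if_neg h2, if_neg h2]
        have hge := pvCut_ge maxc maxn rest (k + 1) (r + e)
        rw [show ((pvCut maxc maxn rest (k + 1) (r + e)) - k).toNat
            = ((pvCut maxc maxn rest (k + 1) (r + e)) - (k + 1)).toNat + 1 by omega]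
        rw [List.take_succ_cons, ih]
    · rw [if_neg h1, if_neg h1]
      simp

-- ===== VERDICT (by name: the statement is the Claim_ definition above) =====
theorem normalize_youtube_tags_spec : Claim_equal_normalize_youtube_tags := by
  intro tags maxc maxn _
  unfold Spec_normalize_youtube_tags
  by_cases h : tags = ""
  · simp [normalize_youtube_tags, normalize_youtube_tags_alt, h]
  · simp only [normalize_youtube_tags, normalize_youtube_tags_alt, if_neg h]
    rw [parse_body_eq, PySem.List.foldl_append_eq_flatMap, List.nil_append, loopA_eq,
      List.nil_append, List.length_nil, Nat.cast_zero]
    have hge := pvCut_ge maxc maxn (pvDedup (((PySem.Str.split? (PySem.Str.replace tags "\n" " ") ",").getD []).flatMap pvPieces) PySem.Set.empty) 0 0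
    rw [PySem.List.slice_to _ hge]
    have hct := cut_take maxc maxn (pvDedup (((PySem.Str.split? (PySem.Str.replace tags "\n" " ") ",").getD []).flatMap pvPieces) PySem.Set.empty) 0 0
    rw [sub_zero] at hct
    rw [hct]
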